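-- pv_equiv track=rewrite | github.com/sadeghzahedi/QRetreive | srcPreTrain/SentenceMatchDataStream.py | solve_box
-- ===== SOURCE A (Python) =====
-- def solve_box (n, p, b, dp, next_dp):
--     if n == 0:
--         return (0,0)
--     elif n+p <= b:
--         next_dp[(n, p)] = n
--         return (n + p, b - (n+p))
--     elif (n,p) in dp:
--         return dp [(n,p)]
--     else:
--         Min = 1000000000
--         Min_empty = 1000000
--         for i in range (1, n+1):
--             for j in range (1, p+1):
--                 if (i + j) <= b: #fixed i and maximum j
--                     box_needed = p // j
--                     if p % j >= 1:
--                         box_needed += 1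
--                     pos_per_box = p//box_needed
--                     pos_per_box_add = p%box_needed
--                     ans = 0
--                     for k in range (box_needed):
--                         pos_this_box = pos_per_box
--                         if pos_per_box_add > 0:
--                             pos_per_box_add -= 1
--                             pos_this_box +=1
--                         ans+=pos_this_box + i
--                         empty = b - (i + pos_this_box) #the last iteration has maximum epty of all boxes of this (i,j)
--                     s_b = solve_box(n-i, p, b, dp, next_dp)
--                     ans += s_b [0]
--                     if (s_b[1] > empty): # empty = min(empty, s_b[1])
--                         empty = s_b[1]
--                     if ans < Min or (ans == Min and empty <= Min_empty): #less or equal for having more negs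
--                         Min = ans
--                         Min_empty = empty
--                         next_dp[(n,p)] = i
--         dp [(n,p)] = (Min, Min_empty)
--         return (Min, Min_empty)
-- ===== SOURCE B (Python) =====
-- # B: bottom-up table instead of A's memoized recursion; per-cell, the innermost
-- # per-box accumulation loop is replaced by closed forms (ans = p + bn*i with
-- # bn = ceil(p/j), last-box empty = b - (i + p//bn)) and the j-guard by a capped range.
-- # Return-value equivalence only: A memoizes into dp and records choices in next_dp;
-- # B reads dp but performs no writes.
-- def solve_box(n, p, b, dp, next_dp):
--     if n == 0:
--         return (0, 0)
--     if n + p <= b: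
--         return (n + p, b - (n + p))
--     if (n, p) in dp:
--         return dp[(n, p)]
--     if p < 1 or b < 2:
--         # no pair (i, j) with i, j >= 1 and i + j <= b and j <= p exists: no candidate anywhere
--         return (1000000000, 1000000)
--     best = {0: (0, 0)}
--     for m in range(1, n):
--         if m + p <= b:
--             best[m] = (m + p, b - (m + p))
--         elif (m, p) in dp:
--             best[m] = dp[(m, p)]
--         else:
--             best[m] = _box_cell(m, p, b, best)
--     return _box_cell(n, p, b, best)
--
-- def _box_cell(m, p, b, best):
--     Min, Min_empty = 1000000000, 1000000
--     for i in range(1, m + 1):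
--         for j in range(1, min(p, b - i) + 1):
--             bn = -(-p // j)
--             sub = best[m - i]
--             ans = p + bn * i + sub[0]
--             empty = max(b - (i + p // bn), sub[1])
--             if ans < Min or (ans == Min and empty <= Min_empty):
--                 Min, Min_empty = ans, empty
--     return (Min, Min_empty)
-- ===== Notes on version B (the rewrite author's own statement) =====
-- stated objective: alternative
-- what changed: A's top-down memoized recursion becomes a bottom-up table over sub-counts m=1..n-1 with a feasibility short-circuit, and inside each cell the innermost per-box accumulation loop is replaced by closed forms (ans = p + ceil(p/j)*i, last-box empty = b - (i + p//box_needed)) with the i+j<=b guard folded into a capped j-range; B reads dp but writes neither dp nor next_dp (return-value equivalence; intended as faster per cell, measured 5.15x at the largest size both finished but unconfirmed at larger sizes).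
import Mathlib
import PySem

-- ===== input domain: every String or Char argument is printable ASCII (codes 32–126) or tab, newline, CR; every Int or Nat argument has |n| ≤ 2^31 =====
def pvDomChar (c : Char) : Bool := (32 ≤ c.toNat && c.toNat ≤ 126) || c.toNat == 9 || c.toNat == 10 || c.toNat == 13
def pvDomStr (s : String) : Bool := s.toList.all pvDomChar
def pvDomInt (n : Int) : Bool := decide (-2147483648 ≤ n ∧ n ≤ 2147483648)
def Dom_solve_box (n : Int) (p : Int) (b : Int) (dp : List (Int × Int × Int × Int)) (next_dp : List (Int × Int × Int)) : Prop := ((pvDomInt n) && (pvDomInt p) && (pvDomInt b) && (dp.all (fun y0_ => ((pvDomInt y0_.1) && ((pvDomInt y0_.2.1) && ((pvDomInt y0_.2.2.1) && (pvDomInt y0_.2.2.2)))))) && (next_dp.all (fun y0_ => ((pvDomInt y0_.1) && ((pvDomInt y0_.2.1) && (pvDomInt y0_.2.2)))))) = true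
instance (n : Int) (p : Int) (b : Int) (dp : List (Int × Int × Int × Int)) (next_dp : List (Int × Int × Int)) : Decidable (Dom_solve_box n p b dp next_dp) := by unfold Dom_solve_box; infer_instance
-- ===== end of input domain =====

-- B replaces A's top-down memoized recursion by a bottom-up table over the sub-counts
-- and, per cell, replaces the innermost per-box accumulation loop by closed forms;
-- equivalence is about the RETURN value only (A memoizes into dp and records choices
-- in next_dp; B reads dp but writes neither dict).

-- state threaded through A's loops: (Min, Min_empty, dp, next_dp)
abbrev PVSt : Type := Int × Int × PySem.Dict (Int × Int) (Int × Int) × PySem.Dict (Int × Int) Int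
-- A's recursive call, partially applied
abbrev PVRec : Type := Int → PySem.Dict (Int × Int) (Int × Int) → PySem.Dict (Int × Int) Int →
  (Int × Int) × PySem.Dict (Int × Int) (Int × Int) × PySem.Dict (Int × Int) Int

-- ===== PORT A =====
-- the 'for k in range(box_needed)' loop: state (pos_per_box_add, ans, empty)
def pvLoopK : Nat → Int → Int → Int → Int → Int → Int → Int × Int × Int
  | 0, ppa, ans, empty, _, _, _ => (ppa, ans, empty)
  | Nat.succ m, ppa, ans, _, ppb, i, b =>
    let pos := if ppa > 0 then ppb + 1 else ppb
    let ppa' := if ppa > 0 then ppa - 1 else ppa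
    pvLoopK m ppa' (ans + (pos + i)) (b - (i + pos)) ppb i b

-- one iteration of the 'for j' loop of A
def pvBodyA (rec : PVRec) (n p b i j : Int) (st : PVSt) : PVSt :=
  if i + j ≤ b then
    let bn0 := PySem.Int.floordiv p j
    let bn := if PySem.Int.mod p j ≥ 1 then bn0 + 1 else bn0
    let ppb := PySem.Int.floordiv p bn
    let ppa := PySem.Int.mod p bn
    let r := pvLoopK bn.toNat ppa 0 0 ppb i b
    let s := rec (n - i) st.2.2.1 st.2.2.2
    let ans := r.2.1 + s.1.1
    let empty := if s.1.2 > r.2.2 then s.1.2 else r.2.2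
    if ans < st.1 ∨ (ans = st.1 ∧ empty ≤ st.2.1) then
      (ans, empty, s.2.1, s.2.2.insert (n, p) i)
    else
      (st.1, st.2.1, s.2.1, s.2.2)
  else st

def pvLoopJA (rec : PVRec) (n p b i : Int) : List Int → PVSt → PVSt
  | [], st => st
  | j :: js, st => pvLoopJA rec n p b i js (pvBodyA rec n p b i j st)

def pvLoopIA (rec : PVRec) (n p b : Int) : List Int → PVSt → PVSt
  | [], st => st
  | i :: is, st => pvLoopIA rec n p b is (pvLoopJA rec n p b i (PySem.List.pyRange 1 (p + 1) 1) st)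

-- A's recursion; fuel = n.toNat + 1 is always sufficient (each call strictly decreases n.toNat)
def pvGoA : Nat → Int → Int → Int →
    PySem.Dict (Int × Int) (Int × Int) → PySem.Dict (Int × Int) Int →
    (Int × Int) × PySem.Dict (Int × Int) (Int × Int) × PySem.Dict (Int × Int) Int
  | 0, _, _, _, dp, nd => ((0, 0), dp, nd)   -- fuel guard only, never reached
  | Nat.succ f, n, p, b, dp, nd =>
    if n = 0 then ((0, 0), dp, nd)
    else if n + p ≤ b then ((n + p, b - (n + p)), dp, nd.insert (n, p) n)
    else match dp.get? (n, p) with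
      | some v => (v, dp, nd)
      | none =>
        let st := pvLoopIA (fun m d e => pvGoA f m p b d e) n p b
          (PySem.List.pyRange 1 (n + 1) 1) (1000000000, 1000000, dp, nd)
        ((st.1, st.2.1), st.2.2.1.insert (n, p) (st.1, st.2.1), st.2.2.2)

def solve_box (n : Int) (p : Int) (b : Int) (dp : List (Int × Int × Int × Int)) (next_dp : List (Int × Int × Int)) : Int × Int :=
  (pvGoA (n.toNat + 1) n p b
    (PySem.Dict.ofList (dp.map (fun q => ((q.1, q.2.1), (q.2.2.1, q.2.2.2)))))
    (PySem.Dict.ofList (next_dp.map (fun q => ((q.1, q.2.1), q.2.2))))).1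

-- ===== PORT B =====
-- Source B's _box_cell: pure double fold with closed-form candidates over a table of subresults
def pvCellB (p b m : Int) (best : PySem.Dict Int (Int × Int)) : Int × Int :=
  (PySem.List.pyRange 1 (m + 1) 1).foldl (fun st i =>
    (PySem.List.pyRange 1 (min p (b - i) + 1) 1).foldl (fun st j =>
      let bn := -(PySem.Int.floordiv (-p) j)
      let sub := (best.get? (m - i)).getD (0, 0)   -- best[m-i]; the key is always present in Source B's runs
      let ans := p + bn * i + sub.1
      let empty := max (b - (i + PySem.Int.floordiv p bn)) sub.2
      if ans < st.1 ∨ (ans = st.1 ∧ empty ≤ st.2) then (ans, empty) else st) st)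
    ((1000000000 : Int), (1000000 : Int))

def solve_box_alt (n : Int) (p : Int) (b : Int) (dp : List (Int × Int × Int × Int)) (next_dp : List (Int × Int × Int)) : Int × Int :=
  let dp0 := PySem.Dict.ofList (dp.map (fun q => ((q.1, q.2.1), (q.2.2.1, q.2.2.2))))
  if n = 0 then (0, 0)
  else if n + p ≤ b then (n + p, b - (n + p))
  else match dp0.get? (n, p) with
    | some v => v
    | none =>
      if p < 1 ∨ b < 2 then (1000000000, 1000000)   -- no (i, j) with i,j ≥ 1, i+j ≤ b, j ≤ p exists
      else
      let best := (PySem.List.pyRange 1 n 1).foldl (fun best m =>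
        if m + p ≤ b then best.insert m (m + p, b - (m + p))
        else match dp0.get? (m, p) with
          | some v => best.insert m v
          | none => best.insert m (pvCellB p b m best))
        (PySem.Dict.ofList [((0 : Int), ((0 : Int), (0 : Int)))])
      pvCellB p b n best

-- ===== PRECONDITION & SPEC =====
def Spec_solve_box (n : Int) (p : Int) (b : Int) (dp : List (Int × Int × Int × Int)) (next_dp : List (Int × Int × Int)) (out : Int × Int) : Prop := out = solve_box_alt n p b dp next_dp
instance (n : Int) (p : Int) (b : Int) (dp : List (Int × Int × Int × Int)) (next_dp : List (Int × Int × Int)) (out : Int × Int) : Decidable (Spec_solve_box n p b dp next_dp out) := by unfold Spec_solve_box; infer_instance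

-- ===== CLAIM (what is proved, stated in full; the proofs are below) =====
def Claim_equal_solve_box : Prop := ∀ (n : Int) (p : Int) (b : Int) (dp : List (Int × Int × Int × Int)) (next_dp : List (Int × Int × Int)), Dom_solve_box n p b dp next_dp → Spec_solve_box n p b dp next_dp (solve_box n p b dp next_dp)

-- ===== LEMMAS AND PROOFS =====

-- pure candidate and tie-update, the shapes shared by both sides
def pvCand (p b i j : Int) (s : Int × Int) : Int × Int :=
  let bn := -(PySem.Int.floordiv (-p) j)
  (p + bn * i + s.1, max (b - (i + PySem.Int.floordiv p bn)) s.2)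

def pvUpd (st c : Int × Int) : Int × Int :=
  if c.1 < st.1 ∨ (c.1 = st.1 ∧ c.2 ≤ st.2) then c else st

-- abstract minimisation over a sub-value function g
def pvMinB (p b m : Int) (g : Int → Int × Int) : Int × Int :=
  (PySem.List.pyRange 1 (m + 1) 1).foldl (fun st i =>
    (PySem.List.pyRange 1 (min p (b - i) + 1) 1).foldl (fun st j =>
      pvUpd st (pvCand p b i j (g (m - i)))) st)
    ((1000000000 : Int), (1000000 : Int))

-- the common value function, fuel-indexed
def pvF (dp0 : PySem.Dict (Int × Int) (Int × Int)) (p b : Int) : Nat → Int → Int × Int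
  | 0, _ => (1000000000, 1000000)   -- fuel guard only
  | Nat.succ f, m =>
    if m = 0 then (0, 0)
    else if m + p ≤ b then (m + p, b - (m + p))
    else match dp0.get? (m, p) with
      | some v => v
      | none => pvMinB p b m (fun k => pvF dp0 p b f k)

def pvV (dp0 : PySem.Dict (Int × Int) (Int × Int)) (p b m : Int) : Int × Int :=
  pvF dp0 p b (m.toNat + 1) m

-- invariant on A's threaded memo dict
def pvInv (dp0 d : PySem.Dict (Int × Int) (Int × Int)) (p b : Int) : Prop :=
  (∀ k v, dp0.get? k = some v → d.get? k = some v) ∧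
  (∀ m v, d.get? (m, p) = some v →
    dp0.get? (m, p) = some v ∨
    (m ≠ 0 ∧ ¬(m + p ≤ b) ∧ dp0.get? (m, p) = none ∧ v = pvV dp0 p b m))

theorem pvFoldId (l : List Int) (st : Int × Int) :
    l.foldl (fun st (_ : Int) => st) st = st := by
  induction l with
  | nil => rfl
  | cons x xs ih => rw [List.foldl_cons]; exact ih

theorem pvMinB_empty (p b m : Int) (g : Int → Int × Int) (h : p < 1 ∨ b < 2) :
    pvMinB p b m g = (1000000000, 1000000) := by
  unfold pvMinB
  rw [PySem.List.foldl_congr_mem (g := fun st (_ : Int) => st)]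
  · exact pvFoldId _ _
  · intro acc i hi
    rw [PySem.List.mem_pyRange_one] at hi
    rw [PySem.List.pyRange_one_eq_nil (by
      rcases h with h | h
      · have : min p (b - i) ≤ p := min_le_left _ _
        omega
      · have : min p (b - i) ≤ b - i := min_le_right _ _
        omega)]
    rfl

theorem pvCellB_eq (p b m : Int) (best : PySem.Dict Int (Int × Int)) :
    pvCellB p b m best = pvMinB p b m (fun k => (best.get? k).getD (0, 0)) := rfl

theorem pvMinB_congr (p b m : Int) (g g' : Int → Int × Int)
    (h : ∀ k, 0 ≤ k → k < m → g k = g' k) : pvMinB p b m g = pvMinB p b m g' := by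
  unfold pvMinB
  apply PySem.List.foldl_congr_mem
  intro st i hi
  rw [PySem.List.mem_pyRange_one] at hi
  rw [h (m - i) (by omega) (by omega)]

theorem pvF_fuel (dp0 : PySem.Dict (Int × Int) (Int × Int)) (p b : Int) :
    ∀ f m, m.toNat < f → pvF dp0 p b f m = pvF dp0 p b (m.toNat + 1) m := by
  intro f
  induction f using Nat.strong_induction_on with
  | _ f ih =>
    intro m hm
    match f, hm with
    | Nat.succ f', hm =>
      show pvF dp0 p b (Nat.succ f') m = pvF dp0 p b (m.toNat + 1) m
      rw [pvF, pvF]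
      split_ifs
      · rfl
      · rfl
      · cases hget : dp0.get? (m, p) with
        | some v => simp only []
        | none =>
          simp only []
          apply pvMinB_congr
          intro k hk0 hkm
          rw [ih f' (by omega) k (by omega), ih m.toNat (by omega) k (by omega)]

theorem pvV_eq (dp0 : PySem.Dict (Int × Int) (Int × Int)) (p b m : Int) :
    pvV dp0 p b m =
      if m = 0 then (0, 0)
      else if m + p ≤ b then (m + p, b - (m + p))
      else match dp0.get? (m, p) with
        | some v => v
        | none => pvMinB p b m (fun k => pvV dp0 p b k) := by
  unfold pvV
  rw [pvF]
  split_ifs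
  · rfl
  · rfl
  · cases hget : dp0.get? (m, p) with
    | some v => simp only []
    | none =>
      simp only []
      apply pvMinB_congr
      intro k hk0 hkm
      exact pvF_fuel dp0 p b m.toNat k (by omega)

-- ceiling division: B's box_needed expression equals A's
theorem pvCeil_eq (p j : Int) (h1 : 1 ≤ j) (h2 : j ≤ p) :
    -(PySem.Int.floordiv (-p) j) =
      (if PySem.Int.mod p j ≥ 1 then PySem.Int.floordiv p j + 1 else PySem.Int.floordiv p j) := by
  have hj : (0 : Int) < j := by omega
  have hfd : PySem.Int.floordiv p j = p / j := PySem.Int.floordiv_eq_ediv_of_pos hj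
  have hmd : PySem.Int.mod p j = p % j := PySem.Int.mod_eq_emod_of_pos hj
  have hdm : p / j * j + p % j = p := Int.ediv_add_emod' p j
  have hr0 : 0 ≤ p % j := Int.emod_nonneg p (by omega)
  have hrlt : p % j < j := Int.emod_lt_of_pos p hj
  rw [hfd, hmd]
  rw [PySem.Int.neg_floordiv_neg_eq_iff_of_pos hj]
  split_ifs with h
  · constructor <;> nlinarith
  · constructor <;> nlinarith

-- closed form of A's k-loop
theorem pvLoopK_spec (m : Nat) : ∀ (ppa ans e ppb i b : Int), 0 ≤ ppa →
    (pvLoopK m ppa ans e ppb i b).2.1 = ans + m * (ppb + i) + min ppa m ∧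
    (pvLoopK m ppa ans e ppb i b).2.2 =
      if m = 0 then e else b - i - ppb - (if (m : Int) ≤ ppa then 1 else 0) := by
  induction m with
  | zero =>
    intro ppa ans e ppb i b h
    refine ⟨?_, ?_⟩ <;> simp [pvLoopK] <;> omega
  | succ m ih =>
    intro ppa ans e ppb i b hppa
    by_cases h : ppa > 0
    · have hrec := ih (ppa - 1) (ans + (ppb + 1 + i)) (b - (i + (ppb + 1))) ppb i b (by omega)
      simp only [pvLoopK, if_pos h]
      refine ⟨?_, ?_⟩
      · rw [hrec.1]; push_cast
        have hmin : min (ppa - 1) (m : Int) = min ppa ((m : Int) + 1) - 1 := by omega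
        rw [hmin]; ring
      · rw [hrec.2]; rcases Nat.eq_zero_or_pos m with hm | hm
        · subst hm; simp only []
          have : ¬((1 : Nat) = 0) := by omega
          simp only [this, if_false]; push_cast
          rw [if_pos (by omega)]; ring
        · have hm0 : m ≠ 0 := by omega
          have hm1 : m + 1 ≠ 0 := by omega
          simp only [hm0, hm1, if_false]; push_cast
          split_ifs <;> omega
    · have hz : ppa = 0 := by omega
      subst hz
      have hrec := ih 0 (ans + (ppb + i)) (b - (i + ppb)) ppb i b le_rfl
      simp only [pvLoopK, if_neg h]
      refine ⟨?_, ?_⟩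
      · rw [hrec.1]; push_cast
        rw [min_eq_left (by positivity : (0:Int) ≤ (m:Int)),
          min_eq_left (by positivity : (0:Int) ≤ (m:Int) + 1)]; ring
      · rw [hrec.2]; rcases Nat.eq_zero_or_pos m with hm | hm
        · subst hm; simp only []
          have : ¬((1 : Nat) = 0) := by omega
          simp only [this, if_false]; push_cast; ring
        · have hm0 : m ≠ 0 := by omega
          have hm1 : m + 1 ≠ 0 := by omega
          simp only [hm0, hm1, if_false]; push_cast
          split_ifs <;> omega

-- the two components of A's in-guard candidate, in terms of B's box_needed expression
theorem pvCandA_comps (p b i j : Int) (h1 : 1 ≤ j) (h2 : j ≤ p) :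
    (pvLoopK (if PySem.Int.mod p j ≥ 1 then PySem.Int.floordiv p j + 1 else PySem.Int.floordiv p j).toNat
        (PySem.Int.mod p (if PySem.Int.mod p j ≥ 1 then PySem.Int.floordiv p j + 1 else PySem.Int.floordiv p j)) 0 0
        (PySem.Int.floordiv p (if PySem.Int.mod p j ≥ 1 then PySem.Int.floordiv p j + 1 else PySem.Int.floordiv p j)) i b).2.1
      = p + -(PySem.Int.floordiv (-p) j) * i ∧
    (pvLoopK (if PySem.Int.mod p j ≥ 1 then PySem.Int.floordiv p j + 1 else PySem.Int.floordiv p j).toNat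
        (PySem.Int.mod p (if PySem.Int.mod p j ≥ 1 then PySem.Int.floordiv p j + 1 else PySem.Int.floordiv p j)) 0 0
        (PySem.Int.floordiv p (if PySem.Int.mod p j ≥ 1 then PySem.Int.floordiv p j + 1 else PySem.Int.floordiv p j)) i b).2.2
      = b - (i + PySem.Int.floordiv p (-(PySem.Int.floordiv (-p) j))) := by
  have hj : (0 : Int) < j := by omega
  have hfd : PySem.Int.floordiv p j = p / j := PySem.Int.floordiv_eq_ediv_of_pos hj
  have hmd : PySem.Int.mod p j = p % j := PySem.Int.mod_eq_emod_of_pos hj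
  have hq1 : 1 ≤ p / j := by rw [Int.le_ediv_iff_mul_le hj]; omega
  rw [pvCeil_eq p j h1 h2]
  set bn : Int := if PySem.Int.mod p j ≥ 1 then PySem.Int.floordiv p j + 1 else PySem.Int.floordiv p j with hbn
  have hbn1 : 1 ≤ bn := by rw [hbn, hfd, hmd]; split_ifs <;> linarith
  have hppa : PySem.Int.mod p bn = p % bn := PySem.Int.mod_eq_emod_of_pos (by omega)
  have hr0 : 0 ≤ p % bn := Int.emod_nonneg p (by omega)
  have hrlt : p % bn < bn := Int.emod_lt_of_pos p (by omega)
  have hcast : ((bn.toNat : Int)) = bn := Int.toNat_of_nonneg (by omega)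
  have hKne : bn.toNat ≠ 0 := by omega
  have hK := pvLoopK_spec bn.toNat (PySem.Int.mod p bn) 0 0 (PySem.Int.floordiv p bn) i b
    (by rw [hppa]; exact hr0)
  constructor
  · rw [hK.1, hcast, hppa, min_eq_left (le_of_lt hrlt),
      PySem.Int.floordiv_eq_ediv_of_pos (show (0:Int) < bn by omega)]
    linear_combination Int.mul_ediv_add_emod p bn
  · rw [hK.2, if_neg hKne, hcast, hppa, if_neg (by omega)]; ring

-- one j-step of A equals the pure guarded pvUpd/pvCand step (dicts stay Inv)
theorem pvBodyA_spec (rec : PVRec) (dp0 : PySem.Dict (Int × Int) (Int × Int))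
    (p b m i j : Int) (V : Int × Int) (h1 : 1 ≤ j) (h2 : j ≤ p)
    (hrec : ∀ d nd, pvInv dp0 d p b →
      (rec (m - i) d nd).1 = V ∧ pvInv dp0 (rec (m - i) d nd).2.1 p b)
    (Mn Me : Int) (d : PySem.Dict (Int × Int) (Int × Int)) (nd : PySem.Dict (Int × Int) Int)
    (hd : pvInv dp0 d p b) :
    ∃ d' nd', pvBodyA rec m p b i j (Mn, Me, d, nd)
        = ((if i + j ≤ b then pvUpd (Mn, Me) (pvCand p b i j V) else (Mn, Me)).1,
           (if i + j ≤ b then pvUpd (Mn, Me) (pvCand p b i j V) else (Mn, Me)).2, d', nd')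
      ∧ pvInv dp0 d' p b := by
  by_cases hg : i + j ≤ b
  · obtain ⟨hs1, hsInv⟩ := hrec d nd hd
    have hc := pvCandA_comps p b i j h1 h2
    have hmax : ∀ x y : Int, (if x > y then x else y) = max y x := by
      intro x y; split_ifs <;> omega
    simp only [pvBodyA, if_pos hg, hs1, hc.1, hc.2, hmax, pvUpd, pvCand]
    split_ifs with hcond
    · exact ⟨(rec (m - i) d nd).2.1, (rec (m - i) d nd).2.2.insert (m, p) i, rfl, hsInv⟩
    · exact ⟨(rec (m - i) d nd).2.1, (rec (m - i) d nd).2.2, rfl, hsInv⟩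
  · refine ⟨d, nd, ?_, hd⟩
    rw [pvBodyA, if_neg hg, if_neg hg]

-- A's j-loop computes the pure guarded fold and preserves Inv
theorem pvLoopJA_spec (rec : PVRec) (dp0 : PySem.Dict (Int × Int) (Int × Int))
    (p b m i : Int) (V : Int × Int)
    (hrec : ∀ d nd, pvInv dp0 d p b →
      (rec (m - i) d nd).1 = V ∧ pvInv dp0 (rec (m - i) d nd).2.1 p b) :
    ∀ (js : List Int), (∀ j ∈ js, 1 ≤ j ∧ j ≤ p) →
    ∀ (Mn Me : Int) d nd, pvInv dp0 d p b →
    ∃ d' nd', pvLoopJA rec m p b i js (Mn, Me, d, nd)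
        = ((js.foldl (fun st j => if i + j ≤ b then pvUpd st (pvCand p b i j V) else st) (Mn, Me)).1,
           (js.foldl (fun st j => if i + j ≤ b then pvUpd st (pvCand p b i j V) else st) (Mn, Me)).2, d', nd')
      ∧ pvInv dp0 d' p b := by
  intro js
  induction js with
  | nil => intro _ Mn Me d nd hd; exact ⟨d, nd, rfl, hd⟩
  | cons j js ih =>
    intro hjs Mn Me d nd hd
    have hj := hjs j (by simp)
    obtain ⟨d1, nd1, hbody, hd1⟩ := pvBodyA_spec rec dp0 p b m i j V hj.1 hj.2 hrec Mn Me d nd hd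
    rw [pvLoopJA, hbody, List.foldl_cons]
    exact ih (fun x hx => hjs x (by simp [hx]))
      ((if i + j ≤ b then pvUpd (Mn, Me) (pvCand p b i j V) else (Mn, Me)).1)
      ((if i + j ≤ b then pvUpd (Mn, Me) (pvCand p b i j V) else (Mn, Me)).2) d1 nd1 hd1

-- A's i-loop computes the pure double fold and preserves Inv
theorem pvLoopIA_spec (rec : PVRec) (dp0 : PySem.Dict (Int × Int) (Int × Int))
    (p b m : Int) (Vf : Int → Int × Int)
    (hrec : ∀ i, 1 ≤ i → i ≤ m → ∀ d nd, pvInv dp0 d p b →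
      (rec (m - i) d nd).1 = Vf (m - i) ∧ pvInv dp0 (rec (m - i) d nd).2.1 p b) :
    ∀ (is : List Int), (∀ i ∈ is, 1 ≤ i ∧ i ≤ m) →
    ∀ (Mn Me : Int) d nd, pvInv dp0 d p b →
    ∃ d' nd', pvLoopIA rec m p b is (Mn, Me, d, nd)
        = ((is.foldl (fun st i => (PySem.List.pyRange 1 (p + 1) 1).foldl
              (fun st j => if i + j ≤ b then pvUpd st (pvCand p b i j (Vf (m - i))) else st) st) (Mn, Me)).1,
           (is.foldl (fun st i => (PySem.List.pyRange 1 (p + 1) 1).foldl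
              (fun st j => if i + j ≤ b then pvUpd st (pvCand p b i j (Vf (m - i))) else st) st) (Mn, Me)).2, d', nd')
      ∧ pvInv dp0 d' p b := by
  intro is
  induction is with
  | nil => intro _ Mn Me d nd hd; exact ⟨d, nd, rfl, hd⟩
  | cons i is ih =>
    intro his Mn Me d nd hd
    have hi := his i (by simp)
    obtain ⟨d1, nd1, hJ, hd1⟩ := pvLoopJA_spec rec dp0 p b m i (Vf (m - i))
      (hrec i hi.1 hi.2) (PySem.List.pyRange 1 (p + 1) 1)
      (fun j hj => by rw [PySem.List.mem_pyRange_one] at hj; omega) Mn Me d nd hd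
    rw [pvLoopIA, hJ, List.foldl_cons]
    exact ih (fun x hx => his x (by simp [hx])) _ _ d1 nd1 hd1

-- a fold whose guard never fires is the identity
theorem pvFoldNoop (b i : Int) (f : Int × Int → Int → Int × Int) :
    ∀ (l : List Int) (st : Int × Int), (∀ j ∈ l, ¬(i + j ≤ b)) →
      l.foldl (fun st j => if i + j ≤ b then f st j else st) st = st := by
  intro l
  induction l with
  | nil => intro st _; rfl
  | cons x xs ihl =>
    intro st hl
    rw [List.foldl_cons, if_neg (hl x (by simp))]
    exact ihl st (fun y hy => hl y (by simp [hy]))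

-- the guarded j-fold over range(1, p+1) equals the unguarded fold over the capped range
theorem pvGuardCap (p b i : Int) (f : Int × Int → Int → Int × Int) (st : Int × Int) :
    (PySem.List.pyRange 1 (p + 1) 1).foldl
        (fun st j => if i + j ≤ b then f st j else st) st
      = (PySem.List.pyRange 1 (min p (b - i) + 1) 1).foldl f st := by
  by_cases hbp : p ≤ b - i
  · rw [min_eq_left hbp]
    apply PySem.List.foldl_congr_mem
    intro acc j hj
    rw [PySem.List.mem_pyRange_one] at hj
    rw [if_pos (by omega)]
  · rw [min_eq_right (by omega)]
    by_cases ht : b - i ≤ 0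
    · rw [PySem.List.pyRange_one_eq_nil (show b - i + 1 ≤ 1 by omega)]
      simp only [List.foldl_nil]
      exact pvFoldNoop b i f _ st (fun j hj => by
        rw [PySem.List.mem_pyRange_one] at hj; omega)
    · rw [PySem.List.pyRange_one_append 1 (b - i + 1) (p + 1) (by omega) (by omega),
        List.foldl_append]
      have hfirst : (PySem.List.pyRange 1 (b - i + 1) 1).foldl
          (fun st j => if i + j ≤ b then f st j else st) st
          = (PySem.List.pyRange 1 (b - i + 1) 1).foldl f st := by
        apply PySem.List.foldl_congr_mem
        intro acc j hj
        rw [PySem.List.mem_pyRange_one] at hj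
        rw [if_pos (by omega)]
      rw [hfirst]
      exact pvFoldNoop b i f _ _ (fun j hj => by
        rw [PySem.List.mem_pyRange_one] at hj; omega)

-- A's recursion computes pvV and preserves Inv
theorem pvGoA_spec (dp0 : PySem.Dict (Int × Int) (Int × Int)) (p b : Int) :
    ∀ (f : Nat) (m : Int) d nd, m.toNat < f → pvInv dp0 d p b →
      (pvGoA f m p b d nd).1 = pvV dp0 p b m ∧ pvInv dp0 (pvGoA f m p b d nd).2.1 p b := by
  intro f
  induction f with
  | zero => intro m d nd hm; omega
  | succ f ih =>
    intro m d nd hm hd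
    rw [pvGoA]
    by_cases h0 : m = 0
    · simp only [if_pos h0]
      refine ⟨?_, hd⟩
      rw [pvV_eq, if_pos h0]
    · simp only [if_neg h0]
      by_cases hle : m + p ≤ b
      · simp only [if_pos hle]
        refine ⟨?_, hd⟩
        rw [pvV_eq, if_neg h0, if_pos hle]
      · simp only [if_neg hle]
        cases hget : d.get? (m, p) with
        | some v =>
          simp only []
          refine ⟨?_, hd⟩
          rcases hd.2 m v hget with hv | hv
          · rw [pvV_eq, if_neg h0, if_neg hle, hv]
          · exact hv.2.2.2
        | none =>
          have hdp0 : dp0.get? (m, p) = none := by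
            cases hdp0' : dp0.get? (m, p) with
            | some w => have := hd.1 _ _ hdp0'; rw [hget] at this; cases this
            | none => rfl
          simp only []
          have hvm : pvV dp0 p b m = pvMinB p b m (fun k => pvV dp0 p b k) := by
            rw [pvV_eq, if_neg h0, if_neg hle, hdp0]
          have hrec : ∀ i, 1 ≤ i → i ≤ m → ∀ d' nd', pvInv dp0 d' p b →
              ((fun m' d e => pvGoA f m' p b d e) (m - i) d' nd').1 = pvV dp0 p b (m - i) ∧
              pvInv dp0 ((fun m' d e => pvGoA f m' p b d e) (m - i) d' nd').2.1 p b := by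
            intro i hi1 hi2 d' nd' hd'
            exact ih (m - i) d' nd' (by omega) hd'
          obtain ⟨d', nd', hI, hd'⟩ := pvLoopIA_spec (fun m' d e => pvGoA f m' p b d e) dp0
            p b m (pvV dp0 p b) hrec (PySem.List.pyRange 1 (m + 1) 1)
            (fun i hi => by rw [PySem.List.mem_pyRange_one] at hi; omega)
            1000000000 1000000 d nd hd
          have hfold : (PySem.List.pyRange 1 (m + 1) 1).foldl
              (fun st i => (PySem.List.pyRange 1 (p + 1) 1).foldl
                (fun st j => if i + j ≤ b then pvUpd st (pvCand p b i j (pvV dp0 p b (m - i))) else st) st)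
              ((1000000000 : Int), (1000000 : Int))
              = pvMinB p b m (fun k => pvV dp0 p b k) := by
            unfold pvMinB
            apply PySem.List.foldl_congr_mem
            intro acc i _
            exact pvGuardCap p b i (fun st j => pvUpd st (pvCand p b i j (pvV dp0 p b (m - i)))) acc
          simp only [hI]
          constructor
          · show (_, _) = pvV dp0 p b m
            rw [hvm, ← hfold]
          · show pvInv dp0 (d'.insert (m, p) _) p b
            constructor
            · intro k v hk
              rw [PySem.Dict.get?_insert]
              split_ifs with hkm
              · subst hkm; rw [hdp0] at hk; cases hk
              · exact hd'.1 k v hk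
            · intro m' v hm'
              rw [PySem.Dict.get?_insert] at hm'
              split_ifs at hm' with hkm
              · have hmm : m' = m := ((Prod.mk.injEq _ _ _ _).mp hkm).1
                subst hmm
                refine Or.inr ⟨h0, hle, hdp0, ?_⟩
                cases hm'
                rw [hvm, ← hfold]
              · exact hd'.2 m' v hm'

-- Inv holds between dp0 and itself
theorem pvInv_refl (dp0 : PySem.Dict (Int × Int) (Int × Int)) (p b : Int) :
    pvInv dp0 dp0 p b :=
  ⟨fun _ _ h => h, fun _ _ h => Or.inl h⟩

-- B's table carries exactly the pvV values
theorem pvTable (dp0 : PySem.Dict (Int × Int) (Int × Int)) (p b n : Int) :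
    ∀ (t : Nat) (lo : Int) (best : PySem.Dict Int (Int × Int)), (n - lo).toNat = t → 1 ≤ lo →
      (∀ k, 0 ≤ k → k < lo → best.get? k = some (pvV dp0 p b k)) →
      ∀ k, 0 ≤ k → k < n →
        ((PySem.List.pyRange lo n 1).foldl (fun best m =>
          if m + p ≤ b then best.insert m (m + p, b - (m + p))
          else match dp0.get? (m, p) with
            | some v => best.insert m v
            | none => best.insert m (pvCellB p b m best)) best).get? k
        = some (pvV dp0 p b k) := by
  intro t
  induction t with
  | zero =>
    intro lo best ht hlo hbest k hk0 hkn
    rw [PySem.List.pyRange_one_eq_nil (by omega)]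
    exact hbest k hk0 (by omega)
  | succ t iht =>
    intro lo best ht hlo hbest k hk0 hkn
    rw [PySem.List.pyRange_one_cons (by omega), List.foldl_cons]
    have hstep : ∀ k, 0 ≤ k → k < lo + 1 →
        (if lo + p ≤ b then best.insert lo (lo + p, b - (lo + p))
         else match dp0.get? (lo, p) with
           | some v => best.insert lo v
           | none => best.insert lo (pvCellB p b lo best)).get? k
        = some (pvV dp0 p b k) := by
      intro k hk0 hklo
      have hval : (if lo + p ≤ b then best.insert lo (lo + p, b - (lo + p))
         else match dp0.get? (lo, p) with
           | some v => best.insert lo v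
           | none => best.insert lo (pvCellB p b lo best))
          = best.insert lo (pvV dp0 p b lo) := by
        rw [pvV_eq]
        simp only [if_neg (show ¬(lo = 0) by omega)]
        by_cases hle : lo + p ≤ b
        · simp only [if_pos hle]
        · simp only [if_neg hle]
          cases hget : dp0.get? (lo, p) with
          | some v => rfl
          | none =>
            rw [pvCellB_eq]
            rw [pvMinB_congr p b lo (fun k => (best.get? k).getD (0, 0)) (fun k => pvV dp0 p b k)
              (fun k hk0 hklo => by
                show (best.get? k).getD (0, 0) = pvV dp0 p b k
                rw [hbest k hk0 hklo]; rfl)]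
      rw [hval, PySem.Dict.get?_insert]
      split_ifs with hkm
      · subst hkm; rfl
      · exact hbest k hk0 (by omega)
    exact iht (lo + 1) _ (by omega) (by omega) hstep k hk0 hkn

-- B computes pvV
theorem pvAlt_eq (n p b : Int) (dp : List (Int × Int × Int × Int)) (next_dp : List (Int × Int × Int)) :
    solve_box_alt n p b dp next_dp
      = pvV (PySem.Dict.ofList (dp.map (fun q => ((q.1, q.2.1), (q.2.2.1, q.2.2.2))))) p b n := by
  simp only [solve_box_alt]
  set dp0 := PySem.Dict.ofList (dp.map (fun q => ((q.1, q.2.1), (q.2.2.1, q.2.2.2)))) with hdp0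
  by_cases h0 : n = 0
  · rw [if_pos h0, pvV_eq, if_pos h0]
  · rw [if_neg h0]
    by_cases hle : n + p ≤ b
    · rw [if_pos hle, pvV_eq, if_neg h0, if_pos hle]
    · rw [if_neg hle]
      cases hget : dp0.get? (n, p) with
      | some v => simp only []; rw [pvV_eq, if_neg h0, if_neg hle, hget]
      | none =>
        simp only []
        rw [pvV_eq, if_neg h0, if_neg hle, hget]
        by_cases hpb : p < 1 ∨ b < 2
        · rw [if_pos hpb, pvMinB_empty p b n _ hpb]
        · rw [if_neg hpb]
          rw [pvCellB_eq]
          apply pvMinB_congr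
          intro k hk0 hkn
          rw [pvTable dp0 p b n (n - 1).toNat 1
            (PySem.Dict.ofList [((0 : Int), ((0 : Int), (0 : Int)))]) (by omega) le_rfl
            (fun k hk0 hk1 => by
              have hk : k = 0 := by omega
              subst hk
              rw [show pvV dp0 p b 0 = (0, 0) by rw [pvV_eq, if_pos rfl]]
              rfl)
            k hk0 hkn]
          rfl

-- ===== VERDICT (by name: the statement is the Claim_ definition above) =====
theorem solve_box_spec : Claim_equal_solve_box := by
  intro n p b dp nd _
  unfold Spec_solve_box
  rw [pvAlt_eq]
  unfold solve_box
  exact (pvGoA_spec _ p b (n.toNat + 1) n _ _ (by omega) (pvInv_refl _ p b)).1
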